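-- pv_equiv track=rewrite | github.com/discordwell/emperorbfdune | tools/decompile_tok.py | format_tokens
-- ===== SOURCE A (Python) =====
-- def format_tokens(tokens):
--     """Pretty-print token list into readable code."""
--     result = []
--     i = 0
--     while i < len(tokens):
--         t = tokens[i]
--         # Combine adjacent digits into numbers
--         if t.isdigit() or (t == '-' and i + 1 < len(tokens) and tokens[i + 1].isdigit()):
--             num = t
--             i += 1
--             while i < len(tokens) and tokens[i].isdigit():
--                 num += tokens[i]
--                 i += 1
--             result.append(num)
--             continue
--         result.append(t)
--         i += 1
--
--     # Join with context-aware spacing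
--     out = ''
--     for j, t in enumerate(result):
--         if j == 0:
--             out = t
--             continue
--         prev = result[j - 1]
--         # No space before ), ,, ;
--         if t in (')', ',', ';'):
--             out += t
--         # No space after (
--         elif prev == '(':
--             out += t
--         # Space around comparison/assignment/logic operators
--         elif t in ('==', '!=', '>=', '<=', '>', '<', '&&', '||', '=', '+', '-'):
--             out += ' ' + t
--         elif prev in ('==', '!=', '>=', '<=', '>', '<', '&&', '||', '=', '+', '-'):
--             out += ' ' + t
--         else:
--             out += ' ' + t
--
--     return out
-- ===== SOURCE B (Python) =====
-- def format_tokens(tokens):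
--     """Pretty-print token list into readable code (single fused pass, joined at the end)."""
--     parts = []
--     prev = None
--     i = 0
--     n = len(tokens)
--     while i < n:
--         t = tokens[i]
--         i += 1
--         if t.isdigit() or (t == '-' and i < n and tokens[i].isdigit()):
--             while i < n and tokens[i].isdigit():
--                 t += tokens[i]
--                 i += 1
--         if t in (')', ',', ';') or prev == '(' or prev is None:
--             parts.append(t)
--         else:
--             parts.append(' ' + t)
--         prev = t
--     return ''.join(parts)
-- ===== Notes on version B (the rewrite author's own statement) =====
-- stated objective: faster
-- what changed: B fuses A's two passes (build a merged token list, then join it with enumerate and result[j-1] lookups and five spacing branches) into one pass over the raw tokens that carries the previously emitted token, collects the spaced pieces in a list and joins them once at the end, never materialising A's intermediate merged list.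
import Mathlib
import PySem

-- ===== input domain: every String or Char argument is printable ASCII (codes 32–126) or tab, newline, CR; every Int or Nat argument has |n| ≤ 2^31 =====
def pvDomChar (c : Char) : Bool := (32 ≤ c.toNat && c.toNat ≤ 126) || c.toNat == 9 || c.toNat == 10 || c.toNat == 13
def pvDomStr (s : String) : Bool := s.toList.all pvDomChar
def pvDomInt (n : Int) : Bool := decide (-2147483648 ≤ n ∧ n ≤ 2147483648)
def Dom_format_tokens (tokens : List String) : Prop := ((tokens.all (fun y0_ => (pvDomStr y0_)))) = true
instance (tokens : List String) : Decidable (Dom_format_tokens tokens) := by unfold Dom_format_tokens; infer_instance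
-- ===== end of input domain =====

-- B fuses A's two passes (merge digit runs into a list, then join it with spacing) into one pass
-- carrying the previously emitted token, collecting the pieces and joining once at the end.

-- ===== PORT A =====

-- `i + 1 < len(tokens) and tokens[i+1].isdigit()`: the next raw token exists and is a digit run
def pvNextDigitA : List String → Bool
  | r :: _ => PySem.Str.strIsdigit r
  | [] => false

-- inner while loop of A's merge phase: `num += tokens[i]` while digits follow
def pvTakeDigitsA (num : String) : List String → String × List String
  | d :: rest => if PySem.Str.strIsdigit d then pvTakeDigitsA (num ++ d) rest else (num, d :: rest)
  | [] => (num, [])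

theorem pvTakeDigitsA_len (num : String) (l : List String) :
    (pvTakeDigitsA num l).2.length ≤ l.length := by
  fun_induction pvTakeDigitsA num l with
  | case1 num d rest h ih => simpa using Nat.le_succ_of_le ih
  | case2 => simp
  | case3 => simp

-- A's first while loop: combine adjacent digits into number tokens (builds `result`)
def pvMergeA : List String → List String
  | [] => []
  | t :: rest =>
    if PySem.Str.strIsdigit t || (t == "-" && pvNextDigitA rest) then
      let p := pvTakeDigitsA t rest
      p.1 :: pvMergeA p.2
    else
      t :: pvMergeA rest
termination_by l => l.length
decreasing_by
  · exact Nat.lt_succ_of_le (pvTakeDigitsA_len _ _)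
  · simp

-- A's join loop for j ≥ 1; `prev` is result[j-1], i.e. the previously handled element
def pvJoinRestA (out prev : String) : List String → String
  | [] => out
  | t :: rest =>
    let out' :=
      if t == ")" || t == "," || t == ";" then out ++ t
      else if prev == "(" then out ++ t
      else if t == "==" || t == "!=" || t == ">=" || t == "<=" || t == ">" || t == "<" ||
              t == "&&" || t == "||" || t == "=" || t == "+" || t == "-" then out ++ " " ++ t
      else if prev == "==" || prev == "!=" || prev == ">=" || prev == "<=" || prev == ">" ||
              prev == "<" || prev == "&&" || prev == "||" || prev == "=" || prev == "+" ||
              prev == "-" then out ++ " " ++ t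
      else out ++ " " ++ t
    pvJoinRestA out' t rest

def format_tokens (tokens : List String) : String :=
  match pvMergeA tokens with
  | [] => ""                            -- out = '' stays empty
  | t :: rest => pvJoinRestA t t rest   -- j = 0: out = t

-- ===== PORT B =====

-- `i < n and tokens[i].isdigit()` at the merge decision point
def pvNextDigitB : List String → Bool
  | r :: _ => PySem.Str.strIsdigit r
  | [] => false

-- B's inner while loop: `t += tokens[i]` while digits follow
def pvConsumeB (t : String) : List String → String × List String
  | d :: rest => if PySem.Str.strIsdigit d then pvConsumeB (t ++ d) rest else (t, d :: rest)
  | [] => (t, [])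

-- B's per-iteration token formation: either the digit-run merge or the token as-is
def pvStepB (t : String) (rest : List String) : String × List String :=
  if PySem.Str.strIsdigit t || (t == "-" && pvNextDigitB rest) then pvConsumeB t rest
  else (t, rest)

theorem pvConsumeB_len (t : String) (l : List String) :
    (pvConsumeB t l).2.length ≤ l.length := by
  fun_induction pvConsumeB t l with
  | case1 t d rest h ih => simpa using Nat.le_succ_of_le ih
  | case2 => simp
  | case3 => simp

theorem pvStepB_len (t : String) (rest : List String) :
    (pvStepB t rest).2.length ≤ rest.length := by
  unfold pvStepB; split
  · exact pvConsumeB_len _ _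
  · simp

-- B's single fused loop: piece-list accumulator + previously emitted token
def pvAltLoop (parts : List String) (prev : Option String) : List String → List String
  | [] => parts
  | t :: rest =>
    let p := pvStepB t rest
    let tok := p.1
    let piece :=
      if tok == ")" || tok == "," || tok == ";" || prev == some "(" || prev == none then tok
      else " " ++ tok
    pvAltLoop (parts ++ [piece]) (some tok) p.2
termination_by l => l.length
decreasing_by exact Nat.lt_succ_of_le (pvStepB_len _ _)

def format_tokens_alt (tokens : List String) : String :=
  String.join (pvAltLoop [] none tokens)

-- ===== PRECONDITION & SPEC =====
def Spec_format_tokens (tokens : List String) (out : String) : Prop := out = format_tokens_alt tokens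
instance (tokens : List String) (out : String) : Decidable (Spec_format_tokens tokens out) := by unfold Spec_format_tokens; infer_instance

-- ===== CLAIM (what is proved, stated in full; the proofs are below) =====
def Claim_equal_format_tokens : Prop := ∀ (tokens : List String), Dom_format_tokens tokens → Spec_format_tokens tokens (format_tokens tokens)

-- ===== LEMMAS AND PROOFS =====

theorem pvJoin_snoc (l : List String) (x : String) : String.join (l ++ [x]) = String.join l ++ x := by
  induction l with
  | nil => simp [String.join]
  | cons a l ih => simp only [List.cons_append, String.join, List.foldl_cons] at ih ⊢
                   simp

theorem pvConsumeB_eq (t : String) (l : List String) : pvConsumeB t l = pvTakeDigitsA t l := by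
  induction l generalizing t with
  | nil => rfl
  | cons d rest ih =>
    by_cases h : PySem.Str.strIsdigit d = true <;> simp [pvConsumeB, pvTakeDigitsA, ih]

theorem pvNextDigitB_eq (l : List String) : pvNextDigitB l = pvNextDigitA l := by
  cases l <;> rfl

theorem pvStepB_eq (t : String) (rest : List String) :
    pvStepB t rest =
      (if PySem.Str.strIsdigit t || (t == "-" && pvNextDigitA rest) then pvTakeDigitsA t rest
       else (t, rest)) := by
  rw [pvStepB, pvNextDigitB_eq, pvConsumeB_eq]

-- the spacing decision applied to `tok` with a known previous token `prev` agrees between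
-- B's collapsed piece rule and A's 5-way if
theorem pvEmit_eq (out prev tok : String) :
    (out ++ (if tok == ")" || tok == "," || tok == ";" || (some prev : Option String) == some "(" ||
               (some prev : Option String) == none then tok else " " ++ tok)) =
    (if tok == ")" || tok == "," || tok == ";" then out ++ tok
     else if prev == "(" then out ++ tok
     else if tok == "==" || tok == "!=" || tok == ">=" || tok == "<=" || tok == ">" || tok == "<" ||
             tok == "&&" || tok == "||" || tok == "=" || tok == "+" || tok == "-" then
        out ++ " " ++ tok
     else if prev == "==" || prev == "!=" || prev == ">=" || prev == "<=" || prev == ">" ||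
             prev == "<" || prev == "&&" || prev == "||" || prev == "=" || prev == "+" ||
             prev == "-" then out ++ " " ++ tok
     else out ++ " " ++ tok) := by
  split_ifs <;> simp_all [String.append_assoc]

theorem pvAltLoop_some (n : Nat) : ∀ (ts : List String), ts.length ≤ n → ∀ (parts : List String)
    (prev : String),
    String.join (pvAltLoop parts (some prev) ts) = pvJoinRestA (String.join parts) prev (pvMergeA ts) := by
  induction n with
  | zero =>
    intro ts h parts prev
    have hts : ts = [] := List.eq_nil_of_length_eq_zero (Nat.le_zero.mp h)
    subst hts
    rw [pvAltLoop, pvMergeA]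
    rfl
  | succ n ih =>
    intro ts h parts prev
    cases ts with
    | nil => rw [pvAltLoop, pvMergeA]; rfl
    | cons t rest =>
      rw [pvAltLoop, pvMergeA, pvStepB_eq]
      by_cases hc : (PySem.Str.strIsdigit t || (t == "-" && pvNextDigitA rest)) = true
      · simp only [hc, if_true]
        simp only [pvJoinRestA]
        rw [ih _ (le_trans (pvTakeDigitsA_len _ _) (Nat.le_of_succ_le_succ h)),
          pvJoin_snoc, pvEmit_eq]
      · simp only [hc, Bool.false_eq_true, if_false]
        simp only [pvJoinRestA]
        rw [ih _ (Nat.le_of_succ_le_succ h), pvJoin_snoc, pvEmit_eq]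

-- ===== VERDICT (by name: the statement is the Claim_ definition above) =====
theorem format_tokens_spec : Claim_equal_format_tokens := by
  intro tokens _
  unfold Spec_format_tokens format_tokens_alt format_tokens
  cases tokens with
  | nil => rw [pvAltLoop, pvMergeA]; rfl
  | cons t rest =>
    rw [pvAltLoop, pvMergeA, pvStepB_eq]
    by_cases hc : (PySem.Str.strIsdigit t || (t == "-" && pvNextDigitA rest)) = true
    · simp only [hc, if_true]
      rw [pvAltLoop_some (pvTakeDigitsA t rest).2.length _ (le_refl _)]
      simp [String.join]
    · simp only [hc, Bool.false_eq_true, if_false]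
      rw [pvAltLoop_some rest.length _ (le_refl _)]
      simp [String.join]
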